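-- pv_equiv track=rewrite | github.com/ASSERT-KTH/Mokav | experiments/pynguin/c4b/return-lst/generated_tests/src_1733/5/src_1733.py | func
-- ===== SOURCE A (Python) =====
-- def func(*args):
-- 	ret_values = []
--
-- 	count = int(args[0])
-- 	std = ['NULL', 'Sheldon', 'Leonard', 'Penny', 'Rajesh', 'Howard']
-- 	fn = ''
-- 	if (count <= 5):
-- 	    ret_values.append(std[count])
-- 	else:
--
-- 	    def findblock(cnt):
-- 	        b = 0
-- 	        ob = 0
-- 	        nb = 0
-- 	        while (nb < cnt):
-- 	            ob = nb
-- 	            nb += (5 * (2 ** b))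
-- 	            b += 1
-- 	        return [b, ob, nb, count]
-- 	    kf = findblock(count)
-- 	    tm = kf[1]
-- 	    shg = kf[0]
-- 	    db = 0
-- 	    while (tm < count):
-- 	        tm += (2 ** (shg - 1))
-- 	        db += 1
-- 	    ret_values.append(std[db])
--
-- 	return ret_values
-- ===== SOURCE B (Python) =====
-- def func(*args):
--     count = int(args[0])
--     std = ['NULL', 'Sheldon', 'Leonard', 'Penny', 'Rajesh', 'Howard']
--     if count <= 5:
--         return [std[count]]
--     n, k = count, 1
--     while n > 5 * k:
--         n -= 5 * k
--         k *= 2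
--     return [std[(n - 1) // k + 1]]
-- ===== Notes on version B (the rewrite author's own statement) =====
-- stated objective: simpler
-- what changed: Replaces A's helper findblock plus a second per-person counting loop with one subtraction loop locating the doubling block and a closed-form index (n-1)//k + 1.
-- outside the precondition, e.g. on func(-7): A raises IndexError, B raises IndexError
import Mathlib
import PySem

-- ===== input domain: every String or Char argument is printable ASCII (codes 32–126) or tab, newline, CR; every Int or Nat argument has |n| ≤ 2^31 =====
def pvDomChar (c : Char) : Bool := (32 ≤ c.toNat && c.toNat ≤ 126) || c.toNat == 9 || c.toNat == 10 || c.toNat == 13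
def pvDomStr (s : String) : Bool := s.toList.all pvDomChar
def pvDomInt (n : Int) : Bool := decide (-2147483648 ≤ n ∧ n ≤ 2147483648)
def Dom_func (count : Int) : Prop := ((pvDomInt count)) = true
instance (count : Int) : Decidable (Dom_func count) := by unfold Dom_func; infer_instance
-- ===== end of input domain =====

-- B replaces A's findblock helper + second counting loop by one subtraction loop and a
-- closed-form index; equivalence is about the return value (neither mutates arguments).

-- ===== PORT A =====
-- while (nb < cnt): ob = nb; nb += 5 * 2**b; b += 1   — returns (b, ob, nb)
def findblockLoop (cnt : Int) (b : Nat) (ob nb : Int) : Nat × Int × Int :=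
  if nb < cnt then findblockLoop cnt (b + 1) nb (nb + 5 * 2 ^ b) else (b, ob, nb)
termination_by (cnt - nb).toNat
decreasing_by
  have : (0:Int) < 2 ^ b := by positivity
  omega

-- while (tm < count): tm += 2**(shg-1); db += 1   — returns db
def tmLoop (cnt : Int) (shg : Nat) (tm db : Int) : Int :=
  if tm < cnt then tmLoop cnt shg (tm + 2 ^ (shg - 1)) (db + 1) else db
termination_by (cnt - tm).toNat
decreasing_by
  have : (0:Int) < 2 ^ (shg - 1) := by positivity
  omega

def func (count : Int) : List String :=
  let std := ["NULL", "Sheldon", "Leonard", "Penny", "Rajesh", "Howard"]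
  if count ≤ 5 then
    match PySem.List.pyGet? std count with
    | some s => [s]
    | none => []          -- IndexError in Python: excluded by Pre_func
  else
    let kf := findblockLoop count 0 0 0
    let tm := kf.2.1
    let shg := kf.1
    let db := tmLoop count shg tm 0
    match PySem.List.pyGet? std db with
    | some s => [s]
    | none => []

-- ===== PORT B =====
-- while n > 5*k: n -= 5*k; k *= 2   (the 1 ≤ k guard only establishes termination; k starts at 1 and doubles)
def blockLoop (n k : Int) : Int × Int :=
  if 5 * k < n ∧ 1 ≤ k then blockLoop (n - 5 * k) (2 * k) else (n, k)
termination_by (n - 5 * k).toNat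
decreasing_by omega

def func_alt (count : Int) : List String :=
  let std := ["NULL", "Sheldon", "Leonard", "Penny", "Rajesh", "Howard"]
  if count ≤ 5 then
    match PySem.List.pyGet? std count with
    | some s => [s]
    | none => []          -- IndexError in Python: excluded by Pre_func
  else
    let nk := blockLoop count 1
    match PySem.List.pyGet? std (PySem.Int.floordiv (nk.1 - 1) nk.2 + 1) with
    | some s => [s]
    | none => []

-- ===== PRECONDITION & SPEC =====
-- Pre_ excludes exactly count ≤ -7, where Python's std[count] raises IndexError in A (and in B).
def Pre_func (count : Int) : Prop := -6 ≤ count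
instance (count : Int) : Decidable (Pre_func count) := by unfold Pre_func; infer_instance
def pvWitness_func : Int := (7)

def Spec_func (count : Int) (out : List String) : Prop := out = func_alt count
instance (count : Int) (out : List String) : Decidable (Spec_func count out) := by unfold Spec_func; infer_instance

-- ===== CLAIM (what is proved, stated in full; the proofs are below) =====
def Claim_equal_func : Prop := ∀ (count : Int), Dom_func count → Pre_func count → Spec_func count (func count)

-- ===== LEMMAS AND PROOFS =====

-- A's second loop counts ceiling((cnt - tm) / 2^(shg-1)) increments.
theorem tmLoop_closed (cnt : Int) (shg : Nat) :
    ∀ (m : Nat) (tm db : Int), (cnt - tm).toNat ≤ m → tm < cnt →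
      tmLoop cnt shg tm db = db + PySem.Int.floordiv (cnt - tm - 1) (2 ^ (shg - 1)) + 1 := by
  intro m
  induction m with
  | zero => intro tm db hm hlt; omega
  | succ m ih =>
    intro tm db hm hlt
    have hk : (0:Int) < 2 ^ (shg - 1) := by positivity
    rw [tmLoop, if_pos hlt]
    by_cases h2 : tm + 2 ^ (shg - 1) < cnt
    · rw [ih (tm + 2 ^ (shg - 1)) (db + 1) (by omega) h2]
      rw [PySem.Int.floordiv_eq_ediv_of_pos hk, PySem.Int.floordiv_eq_ediv_of_pos hk]
      have : cnt - tm - 1 = (cnt - (tm + 2 ^ (shg - 1)) - 1) + 1 * 2 ^ (shg - 1) := by ring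
      rw [this, Int.add_mul_ediv_right _ _ (by omega)]
      ring
    · rw [tmLoop, if_neg h2]
      rw [PySem.Int.floordiv_eq_ediv_of_pos hk]
      have h0 : (cnt - tm - 1) / 2 ^ (shg - 1) = 0 :=
        Int.ediv_eq_zero_of_lt (by omega) (by omega)
      omega

-- The two block-search loops run in lockstep: at round j, A holds (j+1, 5(2^j-1), 5(2^(j+1)-1))
-- and B holds (cnt - 5(2^j-1), 2^j); they exit on the same condition.
theorem loops_sync (cnt : Int) :
    ∀ (m j : Nat), (cnt - 5 * ((2:Int) ^ (j + 1) - 1)).toNat ≤ m →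
      blockLoop (cnt - 5 * ((2:Int) ^ j - 1)) (2 ^ j)
        = (cnt - (findblockLoop cnt (j + 1) (5 * ((2:Int) ^ j - 1)) (5 * ((2:Int) ^ (j + 1) - 1))).2.1,
           2 ^ ((findblockLoop cnt (j + 1) (5 * ((2:Int) ^ j - 1)) (5 * ((2:Int) ^ (j + 1) - 1))).1 - 1)) := by
  intro m
  induction m with
  | zero =>
    intro j hm
    have hx : (0:Int) < 2 ^ j := by positivity
    have hx2 : (2:Int) ^ (j + 1) = 2 * 2 ^ j := by ring
    have hcond : ¬ (5 * ((2:Int) ^ (j + 1) - 1) < cnt) := by omega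
    rw [findblockLoop, if_neg hcond, blockLoop, if_neg (by intro h; omega)]
    simp
  | succ m ih =>
    intro j hm
    have hx : (0:Int) < 2 ^ j := by positivity
    have hx2 : (2:Int) ^ (j + 1) = 2 * 2 ^ j := by ring
    by_cases hcond : 5 * ((2:Int) ^ (j + 1) - 1) < cnt
    · rw [findblockLoop, if_pos hcond, blockLoop, if_pos (by constructor <;> omega)]
      have e1 : cnt - 5 * ((2:Int) ^ j - 1) - 5 * 2 ^ j = cnt - 5 * ((2:Int) ^ (j + 1) - 1) := by
        rw [hx2]; ring
      have e2 : 2 * (2:Int) ^ j = 2 ^ (j + 1) := by ring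
      have e3 : 5 * ((2:Int) ^ (j + 1) - 1) + 5 * 2 ^ (j + 1) = 5 * ((2:Int) ^ (j + 2) - 1) := by
        have : (2:Int) ^ (j + 2) = 2 * 2 ^ (j + 1) := by ring
        rw [this]; ring
      rw [e1, e2, e3]
      have hx3 : (0:Int) < 2 ^ (j + 2) := by positivity
      have hx4 : (2:Int) ^ (j + 2) = 2 * 2 ^ (j + 1) := by ring
      exact ih (j + 1) (by omega)
    · rw [findblockLoop, if_neg hcond, blockLoop, if_neg (by intro h; omega)]
      simp

-- ===== VERDICT (by name: the statement is the Claim_ definition above) =====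
theorem func_spec : Claim_equal_func := by
  intro count _ hpre
  unfold Spec_func func func_alt
  by_cases h5 : count ≤ 5
  · simp [h5]
  · simp only [if_neg h5]
    have h6 : 6 ≤ count := by omega
    -- unfold A's first loop one step: b=0, nb=0 < count
    have step0 : findblockLoop count 0 0 0 = findblockLoop count 1 0 5 := by
      rw [findblockLoop, if_pos (by omega)]; norm_num
    have sync := loops_sync count (count - 5 * ((2:Int) ^ 1 - 1)).toNat 0 (by norm_num)
    norm_num at sync
    set kf := findblockLoop count 1 0 5 with hkf
    have htm : kf.2.1 < count := by
      -- invariant: the returned ob is < cnt when the loop is entered with nb < cnt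
      clear step0 sync hkf
      have : ∀ (m : Nat) (b : Nat) (ob nb : Int), (count - nb).toNat ≤ m → ob < count →
          nb < count → (findblockLoop count b ob nb).2.1 < count := by
        intro m
        induction m with
        | zero => intro b ob nb hm hob hnb; omega
        | succ m ih =>
          intro b ob nb hm hob hnb
          rw [findblockLoop, if_pos hnb]
          by_cases h2 : nb + 5 * 2 ^ b < count
          · have hp : (0:Int) < 2 ^ b := by positivity
            exact ih (b + 1) nb (nb + 5 * 2 ^ b) (by omega) hnb h2
          · rw [findblockLoop, if_neg h2]; exact hnb
      exact this (count - 5).toNat 1 0 5 (by omega) (by omega) (by omega)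
    rw [step0, sync]
    rw [tmLoop_closed count kf.1 (count - kf.2.1).toNat kf.2.1 0 le_rfl htm]
    norm_num
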